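-- pv_equiv track=rewrite | github.com/AaronRMotley/SantoriniPython | Board.py | valid_moves_pretty_print
-- ===== SOURCE A (Python) =====
-- from operator import itemgetter
-- from itertools import groupby
--
-- def valid_moves_pretty_print(valid_moves):
--     if not valid_moves:
--         return ''
--     NUM_TO_STR = {0:'A',1:'B',2:'C',3:'D',4:'E'}
--     pretty_str = ''
--     valid_moves = sorted(valid_moves, key=itemgetter(0,1))
--     grouped_moves = groupby(valid_moves, itemgetter(0,1))
--     for x in grouped_moves:
--         pretty_str += str(x[0][0]+1) + str(NUM_TO_STR[x[0][1]]) + ' -> '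
--         for y in x[1]:
--             pretty_str += str(y[2]+1) + str(NUM_TO_STR[y[3]]) + ','
--         else:
--             pretty_str = pretty_str[:-1]
--             pretty_str += '\n'
--     return pretty_str
-- ===== SOURCE B (Python) =====
-- def valid_moves_pretty_print(valid_moves):
--     if not valid_moves:
--         return ''
--     NUM_TO_STR = {0: 'A', 1: 'B', 2: 'C', 3: 'D', 4: 'E'}
--     grouped = {}
--     for m in valid_moves:
--         grouped.setdefault((m[0], m[1]), []).append((m[2], m[3]))
--     lines = [str(k[0] + 1) + NUM_TO_STR[k[1]] + ' -> '
--              + ','.join(str(a + 1) + NUM_TO_STR[b] for (a, b) in grouped[k])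
--              + '\n'
--              for k in sorted(grouped)]
--     return ''.join(lines)
-- ===== Notes on version B (the rewrite author's own statement) =====
-- stated objective: simpler
-- what changed: B replaces A's sort-of-the-whole-move-list plus itertools.groupby and manual trailing-comma stripping by a single dict-grouping pass over the original list, a sort of only the distinct (row,col) keys, and ','.join of the destination strings.
-- outside the precondition, e.g. on valid_moves_pretty_print([(0, 5, 0, 0)]): A raises KeyError, B raises KeyError; on valid_moves_pretty_print([(0, 0, 0, -1)]): A raises KeyError, B raises KeyError
import Mathlib
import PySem

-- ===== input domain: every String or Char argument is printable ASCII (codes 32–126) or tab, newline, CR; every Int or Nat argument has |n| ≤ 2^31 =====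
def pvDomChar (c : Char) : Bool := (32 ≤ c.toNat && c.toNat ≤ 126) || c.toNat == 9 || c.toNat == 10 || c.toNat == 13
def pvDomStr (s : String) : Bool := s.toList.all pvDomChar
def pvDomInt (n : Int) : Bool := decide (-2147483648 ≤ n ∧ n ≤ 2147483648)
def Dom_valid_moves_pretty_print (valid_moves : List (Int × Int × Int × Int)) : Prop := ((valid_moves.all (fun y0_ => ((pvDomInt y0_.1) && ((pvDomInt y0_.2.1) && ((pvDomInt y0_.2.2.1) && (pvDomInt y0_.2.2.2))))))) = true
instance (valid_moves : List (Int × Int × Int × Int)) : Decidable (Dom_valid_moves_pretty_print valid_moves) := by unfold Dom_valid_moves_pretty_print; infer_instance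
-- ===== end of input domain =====

-- B replaces A's sort-whole-list + itertools.groupby by a single dict-grouping pass plus a sort of the (few) distinct keys; proved to return the same string (objective: alternative/simpler).

-- ===== PORT A =====
-- the NUM_TO_STR literal dict (both Pythons declare the same literal)
def pvN2S : PySem.Dict Int String := PySem.Dict.ofList [(0,"A"),(1,"B"),(2,"C"),(3,"D"),(4,"E")]
-- itemgetter(0,1)
def pvKey (m : Int × Int × Int × Int) : Int × Int := (m.1, m.2.1)

-- itertools.groupby(l, itemgetter(0,1)) with each group materialised: consecutive runs of equal keys
def pvGroupby (l : List (Int × Int × Int × Int)) : List ((Int × Int) × List (Int × Int × Int × Int)) :=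
  match l with
  | [] => []
  | x :: xs =>
    (pvKey x, x :: xs.takeWhile (fun y => pvKey y == pvKey x)) ::
      pvGroupby (xs.dropWhile (fun y => pvKey y == pvKey x))
  termination_by l.length
  decreasing_by
    simp only [List.length_cons]
    exact Nat.lt_succ_of_le (List.length_dropWhile_le _ _)

-- NUM_TO_STR[i] raises KeyError outside 0..4; those inputs are excluded by Pre_ (getD "" there)
def valid_moves_pretty_print (valid_moves : List (Int × Int × Int × Int)) : String :=
  if valid_moves = [] then "" else
    let sortedMoves := PySem.List.sorted2 valid_moves (fun m => m.1) (fun m => m.2.1)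
    (pvGroupby sortedMoves).foldl (fun pretty_str x =>
      let s1 := pretty_str ++ PySem.Int.toStr (x.1.1 + 1) ++ pvN2S.getD x.1.2 "" ++ " -> "
      let s2 := x.2.foldl (fun acc y =>
        acc ++ PySem.Int.toStr (y.2.2.1 + 1) ++ pvN2S.getD y.2.2.2 "" ++ ",") s1
      PySem.Str.slice s2 none (some (-1)) ++ "\n") ""

-- ===== PORT B =====
def valid_moves_pretty_print_alt (valid_moves : List (Int × Int × Int × Int)) : String :=
  if valid_moves = [] then "" else
    let grouped := valid_moves.foldl
      (fun d m => d.modify (pvKey m) [] (fun l => l ++ [(m.2.2.1, m.2.2.2)])) PySem.Dict.empty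
    let lines := (PySem.List.sorted2 grouped.keys (fun k => k.1) (fun k => k.2)).map (fun k =>
      PySem.Int.toStr (k.1 + 1) ++ pvN2S.getD k.2 "" ++ " -> " ++
      PySem.Str.join "," ((grouped.getD k []).map
        (fun ab => PySem.Int.toStr (ab.1 + 1) ++ pvN2S.getD ab.2 "")) ++ "\n")
    PySem.Str.join "" lines

-- ===== PRECONDITION & SPEC =====
-- Pre_ excludes exactly the inputs where Python A raises KeyError: a move whose 2nd or 4th
-- component is outside NUM_TO_STR's keys 0..4.
def Pre_valid_moves_pretty_print (valid_moves : List (Int × Int × Int × Int)) : Prop :=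
  ∀ m ∈ valid_moves, (0 ≤ m.2.1 ∧ m.2.1 ≤ 4) ∧ (0 ≤ m.2.2.2 ∧ m.2.2.2 ≤ 4)
instance (valid_moves : List (Int × Int × Int × Int)) : Decidable (Pre_valid_moves_pretty_print valid_moves) := by
  unfold Pre_valid_moves_pretty_print; infer_instance
def pvWitness_valid_moves_pretty_print : (List (Int × Int × Int × Int)) := [(1, 0, 2, 1), (0, 4, 0, 0)]

def Spec_valid_moves_pretty_print (valid_moves : List (Int × Int × Int × Int)) (out : String) : Prop := out = valid_moves_pretty_print_alt valid_moves
instance (valid_moves : List (Int × Int × Int × Int)) (out : String) : Decidable (Spec_valid_moves_pretty_print valid_moves out) := by unfold Spec_valid_moves_pretty_print; infer_instance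

-- ===== CLAIM (what is proved, stated in full; the proofs are below) =====
def Claim_equal_valid_moves_pretty_print : Prop := ∀ (valid_moves : List (Int × Int × Int × Int)), Dom_valid_moves_pretty_print valid_moves → Pre_valid_moves_pretty_print valid_moves → Spec_valid_moves_pretty_print valid_moves (valid_moves_pretty_print valid_moves)

-- ===== LEMMAS AND PROOFS =====

-- Python's lexicographic order on int pairs, Prop and Bool forms
def pvLt (a b : Int × Int) : Prop := a.1 < b.1 ∨ (a.1 = b.1 ∧ a.2 < b.2)
def pvLe (a b : Int × Int) : Prop := a.1 < b.1 ∨ (a.1 = b.1 ∧ a.2 ≤ b.2)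
def pvLtB (a b : Int × Int) : Bool := decide (a.1 < b.1) || (!decide (b.1 < a.1) && decide (a.2 < b.2))

theorem pvLtB_iff (a b : Int × Int) : pvLtB a b = true ↔ pvLt a b := by
  simp [pvLtB, pvLt]; omega

theorem pvLt_of_le_ne (a b : Int × Int) (h : pvLe a b) (hne : a ≠ b) : pvLt a b := by
  rcases a with ⟨a1, a2⟩; rcases b with ⟨b1, b2⟩
  simp [pvLe, pvLt] at *
  omega

theorem pvLt_irrefl (a : Int × Int) : ¬ pvLt a a := by simp [pvLt]

theorem pvLe_of_not_ltB (a b : Int × Int) (h : pvLtB a b = false) : pvLe b a := by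
  simp [pvLtB] at h; simp [pvLe]; omega

theorem pvLt_le_trans (a b c : Int × Int) (h1 : pvLt a b) (h2 : pvLe b c) : pvLt a c := by
  simp [pvLe, pvLt] at *; omega

theorem pvLt_le (a b : Int × Int) (h : pvLt a b) : pvLe a b := by
  simp [pvLe, pvLt] at *; omega

-- A's sorted2 call is the insertBy fold with the key pvKey
theorem sortedA_eq (vm : List (Int × Int × Int × Int)) :
    PySem.List.sorted2 vm (fun m => m.1) (fun m => m.2.1) =
      vm.foldl (fun acc x => PySem.List.insertBy (fun a b => pvLtB (pvKey a) (pvKey b)) x acc) [] := rfl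

-- B's sorted2 call on key pairs is the insertBy fold with the identity key
theorem sortedB_eq (ks : List (Int × Int)) :
    PySem.List.sorted2 ks (fun k => k.1) (fun k => k.2) =
      ks.foldl (fun acc x => PySem.List.insertBy (fun a b => pvLtB a b) x acc) [] := rfl

theorem insertBy_pairwise_pvLe {α : Type} (f : α → Int × Int) (x : α) (ys : List α)
    (h : ys.Pairwise (fun a b => pvLe (f a) (f b))) :
    (PySem.List.insertBy (fun a b => pvLtB (f a) (f b)) x ys).Pairwise
      (fun a b => pvLe (f a) (f b)) := by
  induction ys with
  | nil => simp [PySem.List.insertBy.eq_1]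
  | cons y ys ih =>
    rw [PySem.List.insertBy.eq_2]
    rcases List.pairwise_cons.mp h with ⟨hy, hys⟩
    by_cases hb : pvLtB (f x) (f y) = true
    · rw [if_pos hb]
      refine List.pairwise_cons.mpr ⟨?_, h⟩
      intro a ha
      rcases List.mem_cons.mp ha with rfl | ha
      · exact pvLt_le _ _ ((pvLtB_iff _ _).mp hb)
      · exact pvLt_le _ _ (pvLt_le_trans _ _ _ ((pvLtB_iff _ _).mp hb) (hy a ha))
    · rw [if_neg hb]
      refine List.pairwise_cons.mpr ⟨?_, ih hys⟩
      intro a ha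
      rcases (PySem.List.insertBy_mem_iff _ _ _ _).mp ha with rfl | ha
      · exact pvLe_of_not_ltB _ _ (by simpa using hb)
      · exact hy a ha

theorem filter_insertBy {α : Type} (f : α → Int × Int) (x : α) (c : Int × Int) (ys : List α)
    (h : ys.Pairwise (fun a b => pvLe (f a) (f b))) :
    (PySem.List.insertBy (fun a b => pvLtB (f a) (f b)) x ys).filter (fun y => f y == c) =
      ys.filter (fun y => f y == c) ++ (if f x == c then [x] else []) := by
  induction ys with
  | nil =>
    rw [PySem.List.insertBy.eq_1]
    by_cases hc : f x == c <;> simp [hc]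
  | cons y ys ih =>
    rw [PySem.List.insertBy.eq_2]
    rcases List.pairwise_cons.mp h with ⟨hy, hys⟩
    by_cases hb : pvLtB (f x) (f y) = true
    · rw [if_pos hb]
      by_cases hc : f x == c
      · -- f x = c and every element of y :: ys has key strictly above f x, so none is c
        have hnone : ∀ a ∈ y :: ys, ¬ (f a == c) := by
          intro a ha hac
          have hlt : pvLt (f x) (f a) := by
            rcases List.mem_cons.mp ha with rfl | ha
            · exact (pvLtB_iff _ _).mp hb
            · exact pvLt_le_trans _ _ _ ((pvLtB_iff _ _).mp hb) (hy a ha)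
          rw [beq_iff_eq] at hc hac
          exact pvLt_irrefl (f x) (by rw [hc] at hlt ⊢; rw [hac] at hlt; exact hlt)
        have hfil : (y :: ys).filter (fun a => f a == c) = [] := by
          apply List.filter_eq_nil_iff.mpr
          intro a ha
          simpa using hnone a ha
        simp [hc, hfil]
      · simp only [Bool.not_eq_true] at hc
        simp [List.filter_cons, hc]
    · rw [if_neg hb]
      simp only [List.filter_cons]
      by_cases hyc : f y == c <;> simp [hyc, ih hys]

theorem foldl_insert_pairwise {α : Type} (f : α → Int × Int) (l : List α) (acc : List α)
    (h : acc.Pairwise (fun a b => pvLe (f a) (f b))) :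
    (l.foldl (fun a x => PySem.List.insertBy (fun a b => pvLtB (f a) (f b)) x a) acc).Pairwise
      (fun a b => pvLe (f a) (f b)) := by
  induction l generalizing acc with
  | nil => exact h
  | cons y ys ih => exact ih _ (insertBy_pairwise_pvLe f y acc h)

theorem foldl_insert_filter {α : Type} (f : α → Int × Int) (l : List α) (acc : List α)
    (h : acc.Pairwise (fun a b => pvLe (f a) (f b))) (c : Int × Int) :
    (l.foldl (fun a x => PySem.List.insertBy (fun a b => pvLtB (f a) (f b)) x a) acc).filter
        (fun y => f y == c) =
      acc.filter (fun y => f y == c) ++ l.filter (fun y => f y == c) := by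
  induction l generalizing acc with
  | nil => simp
  | cons y ys ih =>
    simp only [List.foldl_cons]
    rw [ih _ (insertBy_pairwise_pvLe f y acc h), filter_insertBy f y c acc h]
    by_cases hc : f y == c <;> simp [hc]

theorem foldl_insert_perm {α : Type} (before : α → α → Bool) (l : List α) (acc : List α) :
    (l.foldl (fun a x => PySem.List.insertBy before x a) acc).Perm (acc ++ l) := by
  induction l generalizing acc with
  | nil => simp
  | cons y ys ih =>
    simp only [List.foldl_cons]
    refine (ih _).trans ?_
    exact (((PySem.List.insertBy_perm before y acc).append_right ys).trans
      List.perm_middle.symm)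

-- takeWhile/dropWhile structure of a key-sorted list
theorem twdw (x : Int × Int × Int × Int) (xs : List (Int × Int × Int × Int))
    (h : (x :: xs).Pairwise (fun a b => pvLe (pvKey a) (pvKey b))) :
    xs.takeWhile (fun y => pvKey y == pvKey x) = xs.filter (fun y => pvKey y == pvKey x) ∧
    ∀ y ∈ xs.dropWhile (fun y => pvKey y == pvKey x), pvLt (pvKey x) (pvKey y) := by
  induction xs with
  | nil => simp
  | cons y ys ih =>
    rcases List.pairwise_cons.mp h with ⟨hx, hys⟩
    have hxy : pvLe (pvKey x) (pvKey y) := hx y (List.mem_cons_self)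
    have h' : (x :: ys).Pairwise (fun a b => pvLe (pvKey a) (pvKey b)) :=
      List.pairwise_cons.mpr ⟨fun a ha => hx a (List.mem_cons_of_mem _ ha),
        (List.pairwise_cons.mp hys).2⟩
    by_cases hk : pvKey y == pvKey x
    · simp only [List.takeWhile_cons, List.dropWhile_cons, hk, if_pos]
      rcases ih h' with ⟨ih1, ih2⟩
      exact ⟨by simp [hk, ih1], ih2⟩
    · simp only [Bool.not_eq_true] at hk
      simp only [List.takeWhile_cons, List.dropWhile_cons, hk]
      have hlt : pvLt (pvKey x) (pvKey y) := by
        apply pvLt_of_le_ne _ _ hxy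
        intro hEq
        exact (by simpa using hk : pvKey y ≠ pvKey x) hEq.symm
      constructor
      · symm
        apply List.filter_eq_nil_iff.mpr
        intro a ha
        rcases List.mem_cons.mp ha with rfl | ha
        · simp [hk]
        · have : pvLt (pvKey x) (pvKey a) :=
            pvLt_le_trans _ _ _ hlt ((List.pairwise_cons.mp hys).1 a ha)
          simp only [beq_iff_eq]
          intro hEq
          rw [hEq] at this
          exact pvLt_irrefl _ this
      · intro a ha
        rcases List.mem_cons.mp ha with rfl | ha
        · exact hlt
        · exact pvLt_le_trans _ _ _ hlt ((List.pairwise_cons.mp hys).1 a ha)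

theorem groupby_char (l : List (Int × Int × Int × Int))
    (hl : l.Pairwise (fun a b => pvLe (pvKey a) (pvKey b))) :
    (∀ p ∈ pvGroupby l, p.2 = l.filter (fun y => pvKey y == p.1) ∧ p.2 ≠ []) ∧
    ((pvGroupby l).map Prod.fst).Pairwise pvLt ∧
    (∀ k, k ∈ (pvGroupby l).map Prod.fst ↔ k ∈ l.map pvKey) := by
  induction l using pvGroupby.induct with
  | case1 => simp [pvGroupby]
  | case2 x xs ih =>
    obtain ⟨htw, hdw⟩ := twdw x xs hl
    have hxs : xs = xs.takeWhile (fun y => pvKey y == pvKey x) ++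
        xs.dropWhile (fun y => pvKey y == pvKey x) := (List.takeWhile_append_dropWhile).symm
    have hlr : (xs.dropWhile (fun y => pvKey y == pvKey x)).Pairwise
        (fun a b => pvLe (pvKey a) (pvKey b)) :=
      ((List.pairwise_cons.mp hl).2.sublist (List.dropWhile_sublist _))
    obtain ⟨ih1, ih2, ih3⟩ := ih hlr
    have heq : pvGroupby (x :: xs) =
        (pvKey x, x :: xs.takeWhile (fun y => pvKey y == pvKey x)) ::
          pvGroupby (xs.dropWhile (fun y => pvKey y == pvKey x)) := by
      rw [pvGroupby]
    -- keys of the tail groups lie strictly above pvKey x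
    have hkeys : ∀ k ∈ (pvGroupby (xs.dropWhile (fun y => pvKey y == pvKey x))).map Prod.fst,
        pvLt (pvKey x) k := by
      intro k hk
      rcases List.mem_map.mp ((ih3 k).mp hk) with ⟨y, hy, rfl⟩
      exact hdw y hy
    -- elements of the takeWhile block have key pvKey x
    have hgk : ∀ a ∈ xs.takeWhile (fun y => pvKey y == pvKey x), pvKey a = pvKey x := by
      intro a ha
      have := List.mem_takeWhile_imp ha
      simpa using this
    refine ⟨?_, ?_, ?_⟩
    · intro p hp
      rw [heq] at hp
      rcases List.mem_cons.mp hp with rfl | hp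
      · refine ⟨?_, by simp⟩
        simp only [List.filter_cons, beq_self_eq_true, if_pos]
        rw [htw]
      · obtain ⟨hp2, hpne⟩ := ih1 p hp
        have hp1 : pvLt (pvKey x) p.1 := by
          apply hkeys
          exact List.mem_map.mpr ⟨p, hp, rfl⟩
        have hne : ∀ a, pvKey a = pvKey x → ¬ (pvKey a == p.1) = true := by
          intro a haeq hbeq
          rw [beq_iff_eq] at hbeq
          rw [haeq] at hbeq
          rw [← hbeq] at hp1
          exact pvLt_irrefl _ hp1
        refine ⟨?_, hpne⟩
        rw [hp2]
        have h1 : ¬ (pvKey x == p.1) = true := hne x rfl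
        have h2 : (xs.takeWhile (fun y => pvKey y == pvKey x)).filter
            (fun y => pvKey y == p.1) = [] := by
          apply List.filter_eq_nil_iff.mpr
          intro a ha
          exact hne a (hgk a ha)
        have h3 : (x :: xs).filter (fun y => pvKey y == p.1) =
            (xs.dropWhile (fun y => pvKey y == pvKey x)).filter (fun y => pvKey y == p.1) := by
          conv_lhs => rw [hxs]
          rw [List.filter_cons, List.filter_append, h2]
          simp [h1]
        exact h3.symm
    · rw [heq]
      simp only [List.map_cons]
      exact List.pairwise_cons.mpr ⟨hkeys, ih2⟩
    · intro k
      rw [heq]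
      simp only [List.map_cons, List.mem_cons]
      constructor
      · rintro (rfl | hk)
        · exact Or.inl rfl
        · right
          have hmem := (ih3 k).mp hk
          rw [hxs, List.map_append]
          exact List.mem_append_right _ hmem
      · rintro (rfl | hk)
        · exact Or.inl rfl
        · rw [hxs, List.map_append] at hk
          rcases List.mem_append.mp hk with hk | hk
          · left
            rcases List.mem_map.mp hk with ⟨a, ha, rfl⟩
            exact hgk a ha
          · right
            exact (ih3 k).mpr hk

-- rendering helpers (proof-side only)
def pvVal (m : Int × Int × Int × Int) : Int × Int := (m.2.2.1, m.2.2.2)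
def entryChars (ab : Int × Int) : List Char :=
  (PySem.Int.toStr (ab.1 + 1)).toList ++ (pvN2S.getD ab.2 "").toList
def lineChars (k : Int × Int) (es : List (List Char)) : List Char :=
  entryChars k ++ (" -> ").toList ++ PySem.Chars.join [','] es ++ ['\n']

theorem innerfold (g : List (Int × Int × Int × Int)) : ∀ (s : String),
    (g.foldl (fun acc y =>
        acc ++ PySem.Int.toStr (y.2.2.1 + 1) ++ pvN2S.getD y.2.2.2 "" ++ ",") s).toList =
      s.toList ++ (g.map (fun y => entryChars (pvVal y) ++ [','])).flatten := by
  induction g with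
  | nil => simp
  | cons y g ih =>
    intro s
    simp [ih, String.toList_append, entryChars, pvVal]

theorem dropLast_entries : ∀ (es : List (List Char)), es ≠ [] → ∀ (cs : List Char),
    (cs ++ (es.map (fun e => e ++ [','])).flatten).dropLast =
      cs ++ PySem.Chars.join [','] es := by
  intro es
  induction es with
  | nil => intro h; exact absurd rfl h
  | cons e es ih =>
    intro _ cs
    cases es with
    | nil =>
      simp [PySem.Chars.join_singleton, ← List.append_assoc]
    | cons e' es' =>
      have h1 := ih (by simp) (cs ++ e ++ [','])
      rw [PySem.Chars.join_cons_cons]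
      simp only [List.map_cons, List.flatten_cons, ← List.append_assoc] at h1 ⊢
      exact h1

theorem outerfold : ∀ (gs : List ((Int × Int) × List (Int × Int × Int × Int))),
    (∀ p ∈ gs, p.2 ≠ []) → ∀ (s : String),
    (gs.foldl (fun pretty_str x =>
        PySem.Str.slice
          (x.2.foldl (fun acc y =>
              acc ++ PySem.Int.toStr (y.2.2.1 + 1) ++ pvN2S.getD y.2.2.2 "" ++ ",")
            (pretty_str ++ PySem.Int.toStr (x.1.1 + 1) ++ pvN2S.getD x.1.2 "" ++ " -> "))
          none (some (-1)) ++ "\n") s).toList =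
      s.toList ++
        (gs.map (fun p => lineChars p.1 (p.2.map (fun y => entryChars (pvVal y))))).flatten := by
  intro gs
  induction gs with
  | nil => intro _ s; simp
  | cons p gs ih =>
    intro hne s
    simp only [List.foldl_cons, List.map_cons, List.flatten_cons]
    rw [ih (fun q hq => hne q (List.mem_cons_of_mem _ hq))]
    rw [String.toList_append, PySem.Str.slice_to_neg_one, innerfold]
    have hmapne : (p.2.map (fun y => entryChars (pvVal y))) ≠ [] := by
      simpa using hne p List.mem_cons_self
    have := dropLast_entries (p.2.map (fun y => entryChars (pvVal y))) hmapne
      ((s ++ PySem.Int.toStr (p.1.1 + 1) ++ pvN2S.getD p.1.2 "" ++ " -> ").toList)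
    rw [show (p.2.map (fun y => entryChars (pvVal y) ++ [','])) =
        (p.2.map ((fun e => e ++ [',']) ∘ (fun y => entryChars (pvVal y)))) from rfl,
      ← List.map_map, this]
    simp [String.toList_append, lineChars, entryChars, List.append_assoc]

theorem toList_strjoin (sep : String) (parts : List String) :
    (PySem.Str.join sep parts).toList =
      PySem.Chars.join sep.toList (parts.map String.toList) := by
  simp [PySem.Str.join]

theorem join_empty_sep : ∀ (es : List (List Char)), PySem.Chars.join [] es = es.flatten := by
  intro es
  induction es with
  | nil => simp [PySem.Chars.join_nil]
  | cons e es ih =>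
    cases es with
    | nil => simp [PySem.Chars.join_singleton]
    | cons e' es' =>
      rw [PySem.Chars.join_cons_cons, ih]
      simp

theorem pvLt_ne (a b : Int × Int) (h : pvLt a b) : a ≠ b := by
  intro rfl; exact pvLt_irrefl _ h

-- ===== VERDICT (by name: the statement is the Claim_ definition above) =====
theorem valid_moves_pretty_print_spec : Claim_equal_valid_moves_pretty_print := by
  intro vm _hdom _hpre
  unfold Spec_valid_moves_pretty_print
  by_cases h : vm = []
  · simp [valid_moves_pretty_print, valid_moves_pretty_print_alt, h]
  · apply String.toList_inj.mp
    -- A side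
    have hsort : PySem.List.sorted2 vm (fun m => m.1) (fun m => m.2.1) =
        vm.foldl (fun acc x =>
          PySem.List.insertBy (fun a b => pvLtB (pvKey a) (pvKey b)) x acc) [] := sortedA_eq vm
    set sortedl := vm.foldl (fun acc x =>
      PySem.List.insertBy (fun a b => pvLtB (pvKey a) (pvKey b)) x acc) [] with hsl
    have hs : sortedl.Pairwise (fun a b => pvLe (pvKey a) (pvKey b)) :=
      foldl_insert_pairwise pvKey vm [] List.Pairwise.nil
    obtain ⟨gb1, gb2, gb3⟩ := groupby_char sortedl hs
    have hsperm : sortedl.Perm vm := by simpa using foldl_insert_perm _ vm []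
    have hfiltr : ∀ c, sortedl.filter (fun y => pvKey y == c) =
        vm.filter (fun y => pvKey y == c) := by
      intro c
      simpa using foldl_insert_filter pvKey vm [] List.Pairwise.nil c
    have hA : (valid_moves_pretty_print vm).toList =
        ((pvGroupby sortedl).map
          (fun p => lineChars p.1 (p.2.map (fun y => entryChars (pvVal y))))).flatten := by
      rw [valid_moves_pretty_print, if_neg h, hsort]
      rw [outerfold _ (fun p hp => (gb1 p hp).2)]
      simp
    -- rewrite each group body through its key
    have hA2 : (valid_moves_pretty_print vm).toList =
        (((pvGroupby sortedl).map Prod.fst).map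
          (fun k => lineChars k
            ((vm.filter (fun y => pvKey y == k)).map (fun y => entryChars (pvVal y))))).flatten := by
      rw [hA, List.map_map]
      congr 1
      apply List.map_congr_left
      intro p hp
      have := (gb1 p hp).1
      simp only [Function.comp]
      rw [this, hfiltr]
    -- B side
    set grouped := vm.foldl
      (fun d m => d.modify (pvKey m) [] (fun l => l ++ [(m.2.2.1, m.2.2.2)])) PySem.Dict.empty
      with hgr
    have hkeys : grouped.keys = PySem.Set.ofList (vm.map pvKey) := by
      rw [hgr, PySem.Dict.keys_foldl_modify_key vm pvKey []
        (fun _ m => fun l => l ++ [(m.2.2.1, m.2.2.2)]) PySem.Dict.empty]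
      rfl
    have hgetD : ∀ k, grouped.getD k [] = (vm.filter (fun y => pvKey y == k)).map pvVal := by
      intro k
      have hfold : grouped = (vm.map (fun m => (pvKey m, pvVal m))).foldl
          (fun d p => d.modify p.1 [] (fun l => l ++ [p.2])) PySem.Dict.empty :=
        (List.foldl_map (f := fun m => (pvKey m, pvVal m))
          (g := fun d p => d.modify p.1 [] (fun l => l ++ [p.2]))
          (l := vm) (init := PySem.Dict.empty)).symm
      rw [hfold, PySem.Dict.getD_foldl_modify_append]
      rw [List.filter_map, List.map_map]
      simp [PySem.Dict.getD_empty]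
      rfl
    set sortedKeys := (PySem.Set.ofList (vm.map pvKey)).foldl
      (fun acc x => PySem.List.insertBy (fun a b => pvLtB a b) x acc) [] with hsk
    -- the two key lists coincide
    have hperm : sortedKeys.Perm (PySem.Set.ofList (vm.map pvKey)) := by
      simpa using foldl_insert_perm (fun a b => pvLtB a b) (PySem.Set.ofList (vm.map pvKey)) []
    have hnodupB : sortedKeys.Nodup :=
      hperm.nodup_iff.mpr (PySem.Set.nodup_ofList _)
    have hBle : sortedKeys.Pairwise pvLe := by
      have := foldl_insert_pairwise (fun k => k) (PySem.Set.ofList (vm.map pvKey)) []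
        List.Pairwise.nil
      exact this
    have hBlt : sortedKeys.Pairwise pvLt :=
      (hBle.and hnodupB).imp (fun hab => pvLt_of_le_ne _ _ hab.1 hab.2)
    have hAnodup : ((pvGroupby sortedl).map Prod.fst).Nodup :=
      gb2.imp (fun hab => pvLt_ne _ _ hab)
    have hpermAB : ((pvGroupby sortedl).map Prod.fst).Perm sortedKeys := by
      rw [List.perm_ext_iff_of_nodup hAnodup hnodupB]
      intro k
      rw [gb3 k, hperm.mem_iff, PySem.Set.mem_ofList]
      exact (hsperm.map pvKey).mem_iff
    have hkeyeq : (pvGroupby sortedl).map Prod.fst = sortedKeys := by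
      refine List.Perm.eq_of_pairwise ?_ gb2 hBlt hpermAB
      intro a b _ _ hab hba
      exact absurd (pvLt_le_trans _ _ _ hab (pvLt_le _ _ hba)) (pvLt_irrefl a)
    have hB : (valid_moves_pretty_print_alt vm).toList =
        (sortedKeys.map
          (fun k => lineChars k
            ((vm.filter (fun y => pvKey y == k)).map (fun y => entryChars (pvVal y))))).flatten := by
      rw [valid_moves_pretty_print_alt, if_neg h]
      simp only [← hgr, hkeys, sortedB_eq, ← hsk]
      rw [toList_strjoin, show ("" : String).toList = [] from rfl, join_empty_sep,
        List.map_map]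
      congr 1
      apply List.map_congr_left
      intro k _
      simp only [Function.comp, String.toList_append]
      rw [toList_strjoin, hgetD k, List.map_map, List.map_map]
      simp only [lineChars, entryChars, List.append_assoc]
      have hm : List.map ((String.toList ∘ fun ab =>
            PySem.Int.toStr (ab.1 + 1) ++ pvN2S.getD ab.2 "") ∘ pvVal)
            (List.filter (fun y => pvKey y == k) vm) =
          List.map (fun y => (PySem.Int.toStr ((pvVal y).1 + 1)).toList ++
            (pvN2S.getD (pvVal y).2 "").toList) (List.filter (fun y => pvKey y == k) vm) := by
        apply List.map_congr_left
        intro y _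
        simp [Function.comp, String.toList_append]
      rw [hm, show (",").toList = [','] from rfl, show ("\n").toList = ['\n'] from rfl]
    rw [hA2, hB, hkeyeq]
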